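-- pv_equiv track=rewrite | github.com/chriswjohnston/Nipissing | scripts/update_bylaws.py | find_target_start_pages
-- ===== SOURCE A (Python) =====
-- from typing import Any, Dict, List, Optional, Tuple
--
-- def find_target_start_pages(
--     page_texts: List[str], targets: List[str]
-- ) -> Dict[str, int]:
--     starts:        Dict[str, int] = {}
--     upper_targets = [t.upper() for t in targets]
--     for idx, page_text in enumerate(page_texts):
--         up = (page_text or "").upper()
--         for target in upper_targets:
--             if target in up and target not in starts:
--                 starts[target] = idx
--     return starts
-- ===== SOURCE B (Python) =====
-- def find_target_start_pages(page_texts, targets):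
--     pending = []
--     for t in targets:
--         u = t.upper()
--         if u not in pending:
--             pending.append(u)
--     starts = {}
--     idx = 0
--     for page_text in page_texts:
--         if not pending:
--             break
--         up = page_text.upper()
--         still = []
--         for u in pending:
--             if u in up:
--                 starts[u] = idx
--             else:
--                 still.append(u)
--         pending = still
--         idx += 1
--     return starts
-- ===== Notes on version B (the rewrite author's own statement) =====
-- stated objective: alternative
-- what changed: B dedups the uppercased targets once into a pending worklist, then each page partitions only the still-missing targets into found/still (no dict membership tests, no rescans of resolved targets) and the page loop exits early once every target is found.
import Mathlib
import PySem

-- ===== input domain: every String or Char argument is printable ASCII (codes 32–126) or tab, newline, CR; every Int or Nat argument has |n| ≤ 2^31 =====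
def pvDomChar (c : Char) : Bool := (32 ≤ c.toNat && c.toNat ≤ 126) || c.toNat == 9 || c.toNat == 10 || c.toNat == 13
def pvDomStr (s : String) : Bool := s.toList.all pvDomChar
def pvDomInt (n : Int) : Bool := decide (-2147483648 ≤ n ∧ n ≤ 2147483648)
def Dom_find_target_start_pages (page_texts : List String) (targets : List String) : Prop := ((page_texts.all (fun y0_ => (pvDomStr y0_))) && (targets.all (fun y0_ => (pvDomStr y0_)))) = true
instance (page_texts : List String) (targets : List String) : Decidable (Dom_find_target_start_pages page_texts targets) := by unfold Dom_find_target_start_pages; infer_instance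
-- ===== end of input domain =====

-- B replaces A's per-page rescan of all targets (guarded by dict membership) with a deduplicated
-- worklist of still-missing targets that shrinks as targets are found and stops the page loop early.

-- ===== PORT A =====
-- inner 'for target in upper_targets' loop of A
def aInner (up : String) (idx : Int) (uppers : List String) (s : PySem.Dict String Int) : PySem.Dict String Int :=
  uppers.foldl (fun st target =>
    if PySem.Str.isIn target up && !(st.contains target) then st.insert target idx else st) s

-- outer 'for idx, page_text in enumerate(page_texts)' loop of A
def aOuter (uppers : List String) (pairs : List (Int × String)) (s : PySem.Dict String Int) : PySem.Dict String Int :=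
  pairs.foldl (fun st p => aInner (PySem.Str.upper (if p.2 == "" then "" else p.2)) p.1 uppers st) s

def find_target_start_pages (page_texts : List String) (targets : List String) : List (String × Int) :=
  (aOuter (targets.map PySem.Str.upper) (PySem.List.enumerate page_texts 0) PySem.Dict.empty).items

-- ===== PORT B =====
-- one page of B: partition pending into found (inserted into starts) and still-missing
def bPage (up : String) (idx : Int) (st : PySem.Dict String Int × List String) (pending : List String) :
    PySem.Dict String Int × List String :=
  pending.foldl (fun acc u =>
    if PySem.Str.isIn u up then (acc.1.insert u idx, acc.2) else (acc.1, acc.2 ++ [u])) st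

-- B's page loop with early exit when nothing is pending
def bLoop : List String → PySem.Dict String Int → List String → Int → PySem.Dict String Int
  | [], starts, _, _ => starts
  | p :: ps, starts, pending, idx =>
    if pending.isEmpty then starts
    else
      let r := bPage (PySem.Str.upper p) idx (starts, []) pending
      bLoop ps r.1 r.2 (idx + 1)

def find_target_start_pages_alt (page_texts : List String) (targets : List String) : List (String × Int) :=
  (bLoop page_texts PySem.Dict.empty
    (targets.foldl (fun acc t => PySem.Set.add acc (PySem.Str.upper t)) []) 0).items

-- ===== PRECONDITION & SPEC =====
def Spec_find_target_start_pages (page_texts : List String) (targets : List String) (out : List (String × Int)) : Prop := out = find_target_start_pages_alt page_texts targets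
instance (page_texts : List String) (targets : List String) (out : List (String × Int)) : Decidable (Spec_find_target_start_pages page_texts targets out) := by unfold Spec_find_target_start_pages; infer_instance

-- ===== CLAIM (what is proved, stated in full; the proofs are below) =====
def Claim_equal_find_target_start_pages : Prop := ∀ (page_texts : List String) (targets : List String), Dom_find_target_start_pages page_texts targets → Spec_find_target_start_pages page_texts targets (find_target_start_pages page_texts targets)

-- ===== LEMMAS AND PROOFS =====

-- a single A-step keeps any key already present
theorem contains_aStep (up : String) (idx : Int) (s : PySem.Dict String Int) (x t : String)
    (h : s.contains t = true) :
    ((if PySem.Str.isIn x up && !(s.contains x) then s.insert x idx else s).contains t) = true := by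
  split <;> simp [PySem.Dict.contains_insert, h]

-- aInner keeps any key already present (contains is monotone)
theorem contains_aInner_mono (up : String) (idx : Int) (l : List String)
    (s : PySem.Dict String Int) (t : String) (h : s.contains t = true) :
    (aInner up idx l s).contains t = true := by
  induction l generalizing s with
  | nil => simpa [aInner] using h
  | cons x xs ih =>
    simp only [aInner, List.foldl_cons] at *
    exact ih _ (contains_aStep up idx s x t h)

-- aInner does not add keys outside the processed list
theorem contains_aInner_frame (up : String) (idx : Int) (l : List String)
    (s : PySem.Dict String Int) (x : String) (hx : x ∉ l) :
    (aInner up idx l s).contains x = s.contains x := by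
  induction l generalizing s with
  | nil => simp [aInner]
  | cons y ys ih =>
    simp only [List.mem_cons, not_or] at hx
    simp only [aInner, List.foldl_cons] at *
    rw [ih _ hx.2]
    split
    · rw [PySem.Dict.contains_insert]; simp [hx.1]
    · rfl

-- a 'dead' target (absent from the page, or already recorded) can be dropped from A's inner scan
theorem aInner_filter_dead (up : String) (idx : Int) (t : String)
    (l : List String) (s : PySem.Dict String Int)
    (hd : PySem.Str.isIn t up = false ∨ s.contains t = true) :
    aInner up idx l s = aInner up idx (l.filter (fun x => !(x == t))) s := by
  induction l generalizing s with
  | nil => rfl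
  | cons x xs ih =>
    by_cases hxt : x = t
    · subst hxt
      have hskip : (if PySem.Str.isIn x up && !(s.contains x) then s.insert x idx else s) = s := by
        rcases hd with h | h
        · rw [h]; simp
        · rw [h]; simp
      simp only [aInner, List.foldl_cons, List.filter_cons, beq_self_eq_true, Bool.not_true,
        hskip]
      exact ih s hd
    · simp only [aInner, List.foldl_cons, List.filter_cons,
        show (!(x == t)) = true by simpa using hxt, if_pos]
      apply ih
      rcases hd with h | h
      · exact Or.inl h
      · exact Or.inr (contains_aStep up idx s x t h)

-- PySem dedup unfolds one cons
theorem dedup_cons (x : String) (l : List String) :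
    PySem.List.dedup (x :: l) = x :: (PySem.List.dedup l).filter (fun y => !(y == x)) := by
  have h1 : PySem.List.dedup (x :: l) = PySem.Set.ofList (x :: l) := by
    simp [PySem.List.dedup_eq_ofList]
  rw [h1, PySem.Set.ofList_eq_foldl]
  show List.foldl PySem.Set.add (PySem.Set.add [] x) l = _
  have h2 : PySem.Set.add ([] : List String) x = [x] := rfl
  rw [h2]
  have h3 : List.foldl PySem.Set.add [x] l = PySem.Set.update [x] l := rfl
  rw [h3, PySem.Set.update_eq_append_filter]
  simp [PySem.List.dedup_eq_ofList]
  apply List.filter_congr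
  intro y _
  by_cases hyx : y = x
  · simp [hyx]
  · simp [hyx]

-- A's inner scan over the duplicated target list equals the scan over its dedup
theorem aInner_dedup (up : String) (idx : Int) (l : List String) (s : PySem.Dict String Int) :
    aInner up idx l s = aInner up idx (PySem.List.dedup l) s := by
  induction l generalizing s with
  | nil => rfl
  | cons x xs ih =>
    rw [dedup_cons]
    simp only [aInner, List.foldl_cons]
    show aInner up idx xs (if PySem.Str.isIn x up && !(s.contains x) then s.insert x idx else s)
      = aInner up idx ((PySem.List.dedup xs).filter (fun y => !(y == x)))
          (if PySem.Str.isIn x up && !(s.contains x) then s.insert x idx else s)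
    set s' := if PySem.Str.isIn x up && !(s.contains x) then s.insert x idx else s with hs'
    have hd : PySem.Str.isIn x up = false ∨ s'.contains x = true := by
      cases hIn : PySem.Str.isIn x up
      · exact Or.inl rfl
      · right
        rw [hs']
        cases hc : s.contains x
        · have hIn' : PySem.Chars.isIn x.toList up.toList = true := by simpa using hIn
          simp [hIn', PySem.Dict.contains_insert_self]
        · simp [hc]
    rw [ih s', aInner_filter_dead up idx x _ s' hd]

-- key lemma: B's partition pass over the pending (not-yet-found) targets computes A's inner scan
theorem bPage_eq (up : String) (idx : Int) (d : List String) (hnd : d.Nodup)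
    (s : PySem.Dict String Int) (pend0 : List String) :
    bPage up idx (s, pend0) (d.filter (fun u => !(s.contains u)))
      = (aInner up idx d s,
         pend0 ++ d.filter (fun u => !((aInner up idx d s).contains u))) := by
  induction d generalizing s pend0 with
  | nil => simp [bPage, aInner]
  | cons u d ih =>
    have hu : u ∉ d := (List.nodup_cons.mp hnd).1
    have hnd' : d.Nodup := (List.nodup_cons.mp hnd).2
    by_cases hc : s.contains u = true
    · -- u already recorded: dropped from the pending filter, skipped by A
      have hA : aInner up idx (u :: d) s = aInner up idx d s := by
        simp only [aInner, List.foldl_cons]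
        rw [hc]
        simp
      rw [hA]
      have hfin : (aInner up idx d s).contains u = true := contains_aInner_mono _ _ _ _ _ hc
      rw [List.filter_cons_of_neg (by simp [hc]), List.filter_cons_of_neg (by simp [hfin])]
      exact ih hnd' s pend0
    · rw [Bool.not_eq_true] at hc
      rw [List.filter_cons_of_pos (by simp [hc])]
      cases hIn : PySem.Str.isIn u up
      · -- u not on this page: B keeps it pending, A skips it
        have hA : aInner up idx (u :: d) s = aInner up idx d s := by
          simp only [aInner, List.foldl_cons]
          rw [hIn]
          simp
        rw [hA]
        have hB : bPage up idx (s, pend0) (u :: d.filter (fun v => !(s.contains v)))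
            = bPage up idx (s, pend0 ++ [u]) (d.filter (fun v => !(s.contains v))) := by
          simp only [bPage, List.foldl_cons]
          rw [hIn, if_neg (by simp)]
        rw [hB, ih hnd' s (pend0 ++ [u])]
        have hfin : (aInner up idx d s).contains u = s.contains u :=
          contains_aInner_frame _ _ _ _ _ hu
        rw [List.filter_cons_of_pos (by simp [hfin, hc])]
        simp
      · -- u found on this page: both insert it at idx
        have hA : aInner up idx (u :: d) s = aInner up idx d (s.insert u idx) := by
          simp only [aInner, List.foldl_cons]
          rw [hIn, hc]
          simp
        rw [hA]
        have hB : bPage up idx (s, pend0) (u :: d.filter (fun v => !(s.contains v)))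
            = bPage up idx (s.insert u idx, pend0) (d.filter (fun v => !(s.contains v))) := by
          simp only [bPage, List.foldl_cons]
          rw [hIn, if_pos rfl]
        have hfc : d.filter (fun v => !(s.contains v))
            = d.filter (fun v => !((s.insert u idx).contains v)) := by
          apply List.filter_congr
          intro v hv
          rw [PySem.Dict.contains_insert]
          have : (v == u) = false := by
            simp only [beq_eq_false_iff_ne]
            intro h; exact hu (h ▸ hv)
          rw [this]
          simp
        rw [hB, hfc, ih hnd' (s.insert u idx) pend0]
        have hfin : (aInner up idx d (s.insert u idx)).contains u = true :=
          contains_aInner_mono _ _ _ _ _ (PySem.Dict.contains_insert_self _ _ _)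
        rw [List.filter_cons_of_neg (by simp [hfin])]

-- if every target is already recorded, A's inner scan is the identity
theorem aInner_allDone (up : String) (idx : Int) (l : List String) (s : PySem.Dict String Int)
    (h : ∀ t ∈ l, s.contains t = true) : aInner up idx l s = s := by
  induction l with
  | nil => rfl
  | cons x xs ih =>
    have hx := h x (by simp)
    simp only [aInner, List.foldl_cons]
    rw [hx]
    simp only [Bool.not_true, Bool.and_false]
    exact ih (fun t ht => h t (by simp [ht]))

-- if every target is already recorded, A's whole page loop is the identity
theorem aOuter_allDone (uppers : List String) (pairs : List (Int × String))
    (s : PySem.Dict String Int) (h : ∀ t ∈ uppers, s.contains t = true) :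
    aOuter uppers pairs s = s := by
  induction pairs with
  | nil => rfl
  | cons p ps ih =>
    simp only [aOuter, List.foldl_cons] at ih ⊢
    rw [aInner_allDone _ _ _ _ h]
    exact ih

-- main loop invariant: B's pending list is exactly the dedup'd targets not yet in the dict
theorem bLoop_eq_aOuter (uppers : List String) (pages : List String) (n : Int)
    (s : PySem.Dict String Int) (pend : List String)
    (hp : pend = (PySem.List.dedup uppers).filter (fun u => !(s.contains u))) :
    bLoop pages s pend n = aOuter uppers (PySem.List.enumerate pages n) s := by
  induction pages generalizing n s pend with
  | nil => simp [bLoop, PySem.List.enumerate_nil, aOuter]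
  | cons p ps ih =>
    rw [PySem.List.enumerate_cons]
    by_cases hemp : pend.isEmpty
    · -- nothing pending: every target is recorded, both loops leave the dict unchanged
      have hall : ∀ t ∈ uppers, s.contains t = true := by
        intro t ht
        have hmem : t ∈ PySem.List.dedup uppers := (PySem.List.mem_dedup _ _).mpr ht
        have : pend = [] := List.isEmpty_iff.mp hemp
        rw [this] at hp
        have := List.filter_eq_nil_iff.mp hp.symm t hmem
        simpa using this
      rw [bLoop, if_pos hemp]
      exact (aOuter_allDone uppers _ s hall).symm
    · rw [bLoop, if_neg hemp]
      have hup : PySem.Str.upper p = PySem.Str.upper (if p == "" then "" else p) := by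
        by_cases h : p = ""
        · simp [h]
        · simp [h]
      have hkey := bPage_eq (PySem.Str.upper p) n (PySem.List.dedup uppers)
        (PySem.List.nodup_dedup _) s []
      rw [← aInner_dedup] at hkey
      rw [hp]
      show bLoop ps (bPage (PySem.Str.upper p) n (s, []) _).1
          (bPage (PySem.Str.upper p) n (s, []) _).2 (n + 1) = _
      rw [hkey]
      simp only [List.nil_append]
      rw [ih (n + 1) (aInner (PySem.Str.upper p) n uppers s) _ (by rw [aInner_dedup])]
      simp only [aOuter, List.foldl_cons]
      rw [hup]

-- ===== VERDICT (by name: the statement is the Claim_ definition above) =====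
theorem find_target_start_pages_spec : Claim_equal_find_target_start_pages := by
  intro page_texts targets _
  unfold Spec_find_target_start_pages find_target_start_pages find_target_start_pages_alt
  congr 1
  have hpend : targets.foldl (fun acc t => PySem.Set.add acc (PySem.Str.upper t)) []
      = PySem.List.dedup (targets.map PySem.Str.upper) := by
    rw [← PySem.Set.update_map_eq_foldl_add, PySem.Set.update_nil_left]
    simp [PySem.List.dedup_eq_ofList]
  have hpre : targets.foldl (fun acc t => PySem.Set.add acc (PySem.Str.upper t)) []
      = (PySem.List.dedup (targets.map PySem.Str.upper)).filter
          (fun u => !((PySem.Dict.empty : PySem.Dict String Int).contains u)) := by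
    rw [hpend]
    simp [PySem.Dict.contains_empty]
  exact (bLoop_eq_aOuter (targets.map PySem.Str.upper) page_texts 0 PySem.Dict.empty _ hpre).symm
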